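-- pv_equiv track=rewrite | github.com/LukaszLosieczka/SztucznaInteligencja | SI_lista3/checkers.py | __get_longest_attacks
-- ===== SOURCE A (Python) =====
-- def __get_longest_attacks(attacks):
--     max_length = 0
--     for a in attacks:
--         current_len = len(a)
--         if current_len > max_length:
--             max_length = current_len
--     result = []
--     for a in attacks:
--         if len(a) == max_length:
--             result.append(a)
--     return result
-- ===== SOURCE B (Python) =====
-- def __get_longest_attacks(attacks):
--     max_length = 0
--     result = []
--     for a in attacks:
--         current_len = len(a)
--         if current_len > max_length:
--             max_length = current_len
--             result = [a]
--         elif current_len == max_length: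
--             result.append(a)
--     return result
-- ===== Notes on version B (the rewrite author's own statement) =====
-- stated objective: alternative
-- what changed: Merges A's two passes (compute max length, then filter) into one scan that keeps a running max and resets/extends the winner list as it goes.
import Mathlib
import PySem

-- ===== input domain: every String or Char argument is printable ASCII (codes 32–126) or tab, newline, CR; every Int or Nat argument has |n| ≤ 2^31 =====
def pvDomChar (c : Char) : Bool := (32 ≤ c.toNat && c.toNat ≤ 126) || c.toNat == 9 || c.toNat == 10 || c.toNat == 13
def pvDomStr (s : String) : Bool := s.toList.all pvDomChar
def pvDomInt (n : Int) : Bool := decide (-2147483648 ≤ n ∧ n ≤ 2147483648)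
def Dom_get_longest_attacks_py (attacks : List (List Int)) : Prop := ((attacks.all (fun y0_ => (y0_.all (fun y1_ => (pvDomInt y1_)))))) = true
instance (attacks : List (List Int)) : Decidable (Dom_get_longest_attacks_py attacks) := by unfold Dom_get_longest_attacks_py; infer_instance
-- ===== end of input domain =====

-- B merges A's two passes (max, then filter) into one scan with a running max and winner list.


-- ===== PORT A =====
def get_longest_attacks_py (attacks : List (List Int)) : List (List Int) :=
  let max_length : Int :=
    attacks.foldl (fun m a => if (a.length : Int) > m then (a.length : Int) else m) 0
  attacks.foldl (fun result a => if (a.length : Int) = max_length then result ++ [a] else result) []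

-- ===== PORT B =====
-- one step of B's single pass: reset on a strictly longer attack, append on a tie
def pvBStep (st : Int × List (List Int)) (a : List Int) : Int × List (List Int) :=
  if (a.length : Int) > st.1 then ((a.length : Int), [a])
  else if (a.length : Int) = st.1 then (st.1, st.2 ++ [a])
  else st

def get_longest_attacks_py_alt (attacks : List (List Int)) : List (List Int) :=
  (attacks.foldl pvBStep (0, [])).2

-- ===== PRECONDITION & SPEC =====
def Spec_get_longest_attacks_py (attacks : List (List Int)) (out : List (List Int)) : Prop := out = get_longest_attacks_py_alt attacks
instance (attacks : List (List Int)) (out : List (List Int)) : Decidable (Spec_get_longest_attacks_py attacks out) := by unfold Spec_get_longest_attacks_py; infer_instance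

-- ===== CLAIM (what is proved, stated in full; the proofs are below) =====
def Claim_equal_get_longest_attacks_py : Prop := ∀ (attacks : List (List Int)), Dom_get_longest_attacks_py attacks → Spec_get_longest_attacks_py attacks (get_longest_attacks_py attacks)

-- ===== LEMMAS AND PROOFS =====

-- A's max step as a named function, for the lemmas
def pvAMax (l : List (List Int)) (m : Int) : Int :=
  l.foldl (fun m a => if (a.length : Int) > m then (a.length : Int) else m) m

lemma le_pvAMax (l : List (List Int)) (m : Int) : m ≤ pvAMax l m := by
  induction l generalizing m with
  | nil => simp [pvAMax]
  | cons a t ih =>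
    simp only [pvAMax, List.foldl_cons]
    split_ifs with h
    · exact le_trans (le_of_lt h) (ih _)
    · exact ih _

lemma filter_fold_append (l : List (List Int)) (M : Int) (init : List (List Int)) :
    l.foldl (fun r a => if (a.length : Int) = M then r ++ [a] else r) init
      = init ++ l.foldl (fun r a => if (a.length : Int) = M then r ++ [a] else r) [] := by
  induction l generalizing init with
  | nil => simp
  | cons a t ih =>
    simp only [List.foldl_cons]
    split_ifs
    · simp only [List.nil_append]
      rw [ih, ih [a]]
      simp
    · exact ih init

lemma bfold_eq (l : List (List Int)) (m : Int) (r : List (List Int)) :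
    l.foldl pvBStep (m, r)
      = (pvAMax l m,
         (if pvAMax l m = m then r else [])
           ++ l.foldl (fun s a => if (a.length : Int) = pvAMax l m then s ++ [a] else s) []) := by
  induction l generalizing m r with
  | nil => simp [pvAMax]
  | cons a t ih =>
    have hAM : pvAMax (a :: t) m = pvAMax t (if (a.length : Int) > m then (a.length : Int) else m) := by
      simp [pvAMax]
    simp only [List.foldl_cons, pvBStep]
    by_cases h1 : (a.length : Int) > m
    · simp only [if_pos h1] at hAM ⊢
      rw [ih, hAM]
      have hne : pvAMax t (a.length : Int) ≠ m := by
        have := le_pvAMax t (a.length : Int); omega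
      rw [if_neg hne]
      rw [filter_fold_append t _ (if ((a.length : Int) = pvAMax t (a.length : Int)) then [] ++ [a] else [])]
      by_cases h2 : (a.length : Int) = pvAMax t (a.length : Int)
      · rw [if_pos h2.symm, if_pos h2]; simp
      · rw [if_neg (fun h => h2 h.symm), if_neg h2]; simp
    · simp only [if_neg h1] at hAM ⊢
      by_cases h2 : (a.length : Int) = m
      · simp only [if_pos h2]
        rw [ih, hAM]
        rw [filter_fold_append t _ (if ((a.length : Int) = pvAMax t m) then [] ++ [a] else [])]
        by_cases h3 : pvAMax t m = m
        · have hla : (a.length : Int) = pvAMax t m := by omega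
          rw [if_pos h3, if_pos h3, if_pos hla]; simp
        · have hla : (a.length : Int) ≠ pvAMax t m := by
            have := le_pvAMax t m; omega
          rw [if_neg h3, if_neg h3, if_neg hla]; simp
      · simp only [if_neg h2]
        rw [ih, hAM]
        rw [filter_fold_append t _ (if ((a.length : Int) = pvAMax t m) then [] ++ [a] else [])]
        have hla : (a.length : Int) ≠ pvAMax t m := by
          have := le_pvAMax t m; omega
        rw [if_neg hla]; simp

-- ===== VERDICT (by name: the statement is the Claim_ definition above) =====
theorem get_longest_attacks_py_spec : Claim_equal_get_longest_attacks_py := by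
  intro attacks _
  unfold Spec_get_longest_attacks_py get_longest_attacks_py get_longest_attacks_py_alt
  rw [bfold_eq]
  simp [pvAMax]
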